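-- pv_equiv track=rewrite | github.com/plhosk/wordtracer | scripts/bridge_disconnected.py | wheel_candidate_words_for_mode
-- ===== SOURCE A (Python) =====
-- def token_text(token: str, mode: str) -> str:
--     if mode == "reverse" and len(token) >= 2:
--         return token[::-1]
--     return token
--
-- def wheel_candidate_words_for_mode(
--     lexicon: set[str],
--     wheel_tokens: list[str],
--     mode: str,
--     min_len: int = 3,
--     max_len: int = 12,
-- ) -> set[str]:
--     found: set[str] = set()
--
--     def walk(current: str, used_mask: int) -> None:
--         if len(current) >= min_len and current in lexicon:
--             found.add(current)
--         if len(current) >= max_len: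
--             return
--
--         for idx, token in enumerate(wheel_tokens):
--             if used_mask & (1 << idx):
--                 continue
--             nxt = current + token_text(token, mode)
--             if len(nxt) > max_len:
--                 continue
--             walk(nxt, used_mask | (1 << idx))
--
--     walk("", 0)
--     return found
-- ===== SOURCE B (Python) =====
-- def token_text(token: str, mode: str) -> str:
--     if mode == "reverse" and len(token) >= 2:
--         return token[::-1]
--     return token
--
-- def wheel_candidate_words_for_mode(
--     lexicon,
--     wheel_tokens,
--     mode,
--     min_len=3,
--     max_len=12,
-- ):
--     # Alternative search: precompute token texts
--     # and the set of all prefixes of lexicon words, generate the list of hits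
--     # (no accumulator set threaded through the search), dedupe at the end.
--     texts = [token_text(t, mode) for t in wheel_tokens]
--     prefixes = {w[:i] for w in lexicon for i in range(len(w) + 1)}
--
--     def words(current, mask):
--         hits = [current] if len(current) >= min_len and current in lexicon else []
--         if len(current) >= max_len:
--             return hits
--         for i, t in enumerate(texts):
--             if not mask & (1 << i):
--                 nxt = current + t
--                 if len(nxt) <= max_len and nxt in prefixes:
--                     hits = hits + words(nxt, mask | (1 << i))
--         return hits
--
--     return set(words("", 0))
-- ===== Notes on version B (the rewrite author's own statement) =====
-- stated objective: alternative
-- what changed: B precomputes the mode-transformed token texts and the set of all prefixes of lexicon words, prunes branches whose extended string is not a lexicon prefix, and replaces A's threaded accumulator set with a pure list-returning generator whose result is deduplicated into a set at the end.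
import Mathlib
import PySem

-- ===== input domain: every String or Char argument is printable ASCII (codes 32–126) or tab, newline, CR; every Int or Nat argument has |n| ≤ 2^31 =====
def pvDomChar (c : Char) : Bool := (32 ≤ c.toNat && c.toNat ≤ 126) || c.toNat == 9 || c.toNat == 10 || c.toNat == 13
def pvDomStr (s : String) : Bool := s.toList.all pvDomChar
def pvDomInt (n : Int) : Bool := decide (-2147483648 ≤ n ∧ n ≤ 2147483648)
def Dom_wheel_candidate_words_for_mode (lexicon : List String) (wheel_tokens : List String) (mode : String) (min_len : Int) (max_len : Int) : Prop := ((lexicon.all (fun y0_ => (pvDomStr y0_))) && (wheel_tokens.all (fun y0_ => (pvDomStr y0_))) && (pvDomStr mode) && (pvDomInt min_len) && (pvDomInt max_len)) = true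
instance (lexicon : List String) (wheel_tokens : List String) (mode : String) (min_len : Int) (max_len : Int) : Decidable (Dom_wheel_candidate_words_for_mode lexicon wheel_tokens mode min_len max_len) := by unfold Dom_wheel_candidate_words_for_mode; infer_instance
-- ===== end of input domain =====

-- B prunes with a precomputed lexicon-prefix set and generates the hit LIST with a
-- pure recursive generator, deduplicating into a set at the end, instead of A's
-- exhaustive walk threading an accumulator set (objective: alternative).

-- ===== PORT A =====
-- token_text(token, mode) (identical helper in Source A and Source B)
def tokenText (token : String) (mode : String) : String :=
  if mode == "reverse" ∧ 2 ≤ PySem.Str.len token then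
    (PySem.Str.slice? token none none (-1)).getD token   -- token[::-1]; step -1 never raises
  else token

-- the nested 'walk': recursion made total by a fuel counter (a strict upper bound
-- on the recursion depth, so it is never exhausted); used_mask is a nonnegative
-- Python int, kept as Nat so that &&& / ||| / <<< are exact.
def walkA (lexicon : List String) (wheel_tokens : List String) (mode : String)
    (min_len max_len : Int) : Nat → String → Nat → PySem.Set String → PySem.Set String
  | 0, _, _, found => found
  | fuel + 1, current, used_mask, found =>
    let found1 := if min_len ≤ PySem.Str.len current ∧ current ∈ lexicon then
        PySem.Set.add found current else found
    if max_len ≤ PySem.Str.len current then found1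
    else
      wheel_tokens.zipIdx.foldl (fun fnd p =>
        if used_mask &&& (1 <<< p.2) ≠ 0 then fnd
        else
          let nxt := current ++ tokenText p.1 mode
          if max_len < PySem.Str.len nxt then fnd
          else walkA lexicon wheel_tokens mode min_len max_len fuel nxt (used_mask ||| (1 <<< p.2)) fnd) found1

def wheel_candidate_words_for_mode (lexicon : List String) (wheel_tokens : List String) (mode : String) (min_len : Int) (max_len : Int) : List String :=
  walkA lexicon wheel_tokens mode min_len max_len (wheel_tokens.length + 1) "" 0 PySem.Set.empty

-- ===== PORT B =====
-- B's 'words': a pure generator returning the list of hits of the subtree (no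
-- accumulator set), iterating over the precomputed texts and skipping any nxt
-- that is not in the lexicon-prefix set; same fuel scheme as A's walk.
def wordsB (lexicon : List String) (texts : List String) (prefixes : PySem.Set String)
    (min_len max_len : Int) : Nat → String → Nat → List String
  | 0, _, _ => []
  | fuel + 1, current, mask =>
    let hits := if min_len ≤ PySem.Str.len current ∧ current ∈ lexicon then [current] else []
    if max_len ≤ PySem.Str.len current then hits
    else
      texts.zipIdx.foldl (fun acc p =>
        if mask &&& (1 <<< p.2) = 0 ∧ PySem.Str.len (current ++ p.1) ≤ max_len
            ∧ (current ++ p.1) ∈ prefixes then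
          acc ++ wordsB lexicon texts prefixes min_len max_len fuel (current ++ p.1) (mask ||| (1 <<< p.2))
        else acc) hits

def wheel_candidate_words_for_mode_alt (lexicon : List String) (wheel_tokens : List String) (mode : String) (min_len : Int) (max_len : Int) : List String :=
  let texts := wheel_tokens.map (fun t => tokenText t mode)
  -- prefixes = {w[:i] for w in lexicon for i in range(len(w)+1)}, built as in Source B
  let prefixes : PySem.Set String :=
    lexicon.foldl (fun s w =>
      (List.range (w.toList.length + 1)).foldl (fun s i => PySem.Set.add s (String.ofList (w.toList.take i))) s)
      PySem.Set.empty
  PySem.Set.ofList (wordsB lexicon texts prefixes min_len max_len (wheel_tokens.length + 1) "" 0)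

-- ===== PRECONDITION & SPEC =====
def Spec_wheel_candidate_words_for_mode (lexicon : List String) (wheel_tokens : List String) (mode : String) (min_len : Int) (max_len : Int) (out : List String) : Prop := out = wheel_candidate_words_for_mode_alt lexicon wheel_tokens mode min_len max_len
instance (lexicon : List String) (wheel_tokens : List String) (mode : String) (min_len : Int) (max_len : Int) (out : List String) : Decidable (Spec_wheel_candidate_words_for_mode lexicon wheel_tokens mode min_len max_len out) := by unfold Spec_wheel_candidate_words_for_mode; infer_instance

-- ===== CLAIM (what is proved, stated in full; the proofs are below) =====
def Claim_equal_wheel_candidate_words_for_mode : Prop := ∀ (lexicon : List String) (wheel_tokens : List String) (mode : String) (min_len : Int) (max_len : Int), Dom_wheel_candidate_words_for_mode lexicon wheel_tokens mode min_len max_len → Spec_wheel_candidate_words_for_mode lexicon wheel_tokens mode min_len max_len (wheel_candidate_words_for_mode lexicon wheel_tokens mode min_len max_len)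

-- ===== LEMMAS AND PROOFS =====

-- membership in B's prefix set ↔ being a prefix of some lexicon word
theorem mem_add_foldl_range {f : Nat → String} (s : String) (l : List Nat) (init : PySem.Set String) :
    s ∈ l.foldl (fun acc i => PySem.Set.add acc (f i)) init ↔ s ∈ init ∨ ∃ i ∈ l, s = f i := by
  induction l generalizing init with
  | nil => simp
  | cons x t ih =>
    simp only [List.foldl_cons, ih, PySem.Set.mem_add, List.mem_cons]
    constructor
    · rintro (⟨h | h⟩ | ⟨i, hi, rfl⟩)
      · exact Or.inl h
      · exact Or.inr ⟨x, Or.inl rfl, h⟩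
      · exact Or.inr ⟨i, Or.inr hi, rfl⟩
    · rintro (h | ⟨i, (rfl | hi), rfl⟩)
      · exact Or.inl (Or.inl h)
      · exact Or.inl (Or.inr rfl)
      · exact Or.inr ⟨i, hi, rfl⟩

theorem mem_prefixSet_gen (lexicon : List String) (s : String) (init : PySem.Set String) :
    s ∈ lexicon.foldl (fun s w =>
      (List.range (w.toList.length + 1)).foldl (fun s i => PySem.Set.add s (String.ofList (w.toList.take i))) s)
      init ↔ s ∈ init ∨ ∃ w ∈ lexicon, s.toList <+: w.toList := by
  induction lexicon generalizing init with
  | nil => simp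
  | cons w t ih =>
    rw [List.foldl_cons, ih]
    have key : s ∈ (List.range (w.toList.length + 1)).foldl
          (fun s i => PySem.Set.add s (String.ofList (w.toList.take i))) init
        ↔ s ∈ init ∨ s.toList <+: w.toList := by
      rw [mem_add_foldl_range]
      apply or_congr_right
      constructor
      · rintro ⟨i, _, rfl⟩
        simpa using List.take_prefix i w.toList
      · intro hp
        refine ⟨s.toList.length, ?_, ?_⟩
        · simpa [Nat.lt_succ_iff] using hp.length_le
        · rw [List.prefix_iff_eq_take] at hp
          rw [← hp, String.ofList_toList]
    rw [key]
    simp only [List.mem_cons]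
    constructor
    · rintro (⟨h | h⟩ | ⟨u, hu, h⟩)
      · exact Or.inl h
      · exact Or.inr ⟨w, Or.inl rfl, h⟩
      · exact Or.inr ⟨u, Or.inr hu, h⟩
    · rintro (h | ⟨u, (rfl | hu), h⟩)
      · exact Or.inl (Or.inl h)
      · exact Or.inl (Or.inr h)
      · exact Or.inr ⟨u, hu, h⟩

theorem mem_prefixSet (lexicon : List String) (s : String) :
    s ∈ lexicon.foldl (fun s w =>
      (List.range (w.toList.length + 1)).foldl (fun s i => PySem.Set.add s (String.ofList (w.toList.take i))) s)
      PySem.Set.empty ↔ ∃ w ∈ lexicon, s.toList <+: w.toList := by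
  rw [mem_prefixSet_gen]
  simp [PySem.Set.empty]

-- if current is not a prefix of any lexicon word, the whole A-subtree adds nothing
theorem walkA_dead (lexicon wheel_tokens : List String) (mode : String) (min_len max_len : Int)
    (fuel : Nat) (current : String) (mask : Nat) (found : PySem.Set String)
    (h : ¬ ∃ w ∈ lexicon, current.toList <+: w.toList) :
    walkA lexicon wheel_tokens mode min_len max_len fuel current mask found = found := by
  induction fuel generalizing current mask found with
  | zero => rfl
  | succ fuel ih =>
    have hmem : current ∉ lexicon := fun hm => h ⟨current, hm, List.prefix_refl _⟩
    simp only [walkA]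
    rw [if_neg (show ¬(min_len ≤ PySem.Str.len current ∧ current ∈ lexicon) from fun hc => hmem hc.2)]
    by_cases hq : max_len ≤ PySem.Str.len current
    · rw [if_pos hq]
    · rw [if_neg hq, PySem.List.foldl_congr_mem (g := fun acc _ => acc), PySem.List.foldl_ignore]
      intro acc p _
      dsimp only
      split
      · rfl
      · split
        · rfl
        · apply ih
          rintro ⟨w, hw, hpre⟩
          refine h ⟨w, hw, ?_⟩
          have h1 : current.toList <+: (current ++ tokenText p.1 mode).toList := by
            simp [List.prefix_append]
          exact h1.trans hpre

-- folding Set.add over a list produced by a conditional-append fold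
-- = folding the corresponding setwise step
theorem foldl_add_of_ite_append {α : Type} (l : List α) (C : α → Prop) [DecidablePred C]
    (W : α → List String) (F : PySem.Set String → α → PySem.Set String)
    (init : List String) (found : PySem.Set String)
    (h : ∀ (s : PySem.Set String) (p : α), p ∈ l →
      F s p = if C p then (W p).foldl PySem.Set.add s else s) :
    (l.foldl (fun acc p => if C p then acc ++ W p else acc) init).foldl PySem.Set.add found
      = l.foldl F (init.foldl PySem.Set.add found) := by
  revert h
  induction l generalizing init found with
  | nil => intro _; rfl
  | cons x t ih =>
    intro h
    simp only [List.foldl_cons]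
    rw [ih _ _ (fun s p hp => h s p (List.mem_cons_of_mem _ hp)),
      h (List.foldl PySem.Set.add found init) x (by simp)]
    by_cases hc : C x
    · rw [if_pos hc, if_pos hc, List.foldl_append]
    · rw [if_neg hc, if_neg hc]

-- the main bridge: A's accumulator walk = fold Set.add over B's generated list
theorem walkA_eq_fold_wordsB (lexicon wheel_tokens : List String) (mode : String) (min_len max_len : Int)
    (fuel : Nat) (current : String) (mask : Nat) (found : PySem.Set String) :
    walkA lexicon wheel_tokens mode min_len max_len fuel current mask found
      = (wordsB lexicon (wheel_tokens.map (fun t => tokenText t mode))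
          (lexicon.foldl (fun s w =>
            (List.range (w.toList.length + 1)).foldl (fun s i => PySem.Set.add s (String.ofList (w.toList.take i))) s)
            PySem.Set.empty)
          min_len max_len fuel current mask).foldl PySem.Set.add found := by
  induction fuel generalizing current mask found with
  | zero => rfl
  | succ fuel ih =>
    simp only [walkA, wordsB]
    have hhits :
        ((if min_len ≤ PySem.Str.len current ∧ current ∈ lexicon then [current] else []).foldl
          PySem.Set.add found)
        = (if min_len ≤ PySem.Str.len current ∧ current ∈ lexicon then PySem.Set.add found current else found) := by
      split <;> simp
    by_cases hq : max_len ≤ PySem.Str.len current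
    · rw [if_pos hq, if_pos hq, hhits]
    · rw [if_neg hq, if_neg hq, List.zipIdx_map, List.foldl_map]
      simp only [Prod.map, id_eq]
      rw [foldl_add_of_ite_append
          (C := fun (p : String × Nat) => mask &&& (1 <<< p.2) = 0
            ∧ PySem.Str.len (current ++ tokenText p.1 mode) ≤ max_len
            ∧ (current ++ tokenText p.1 mode) ∈ lexicon.foldl (fun s w =>
                (List.range (w.toList.length + 1)).foldl
                  (fun s i => PySem.Set.add s (String.ofList (w.toList.take i))) s) PySem.Set.empty)
          (W := fun (p : String × Nat) =>
            wordsB lexicon (wheel_tokens.map (fun t => tokenText t mode))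
              (lexicon.foldl (fun s w => (List.range (w.toList.length + 1)).foldl
                (fun s i => PySem.Set.add s (String.ofList (w.toList.take i))) s) PySem.Set.empty)
              min_len max_len fuel (current ++ tokenText p.1 mode) (mask ||| (1 <<< p.2)))
          (F := fun fnd (p : String × Nat) =>
            if mask &&& (1 <<< p.2) ≠ 0 then fnd
            else if max_len < PySem.Str.len (current ++ tokenText p.1 mode) then fnd
            else walkA lexicon wheel_tokens mode min_len max_len fuel
              (current ++ tokenText p.1 mode) (mask ||| (1 <<< p.2)) fnd),
        hhits]
      intro s p _
      obtain ⟨tok, idx⟩ := p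
      by_cases hm : mask &&& 1 <<< idx ≠ 0
      · rw [if_pos hm, if_neg (by tauto)]
      · rw [if_neg hm]
        rw [not_not] at hm
        by_cases hlen : max_len < PySem.Str.len (current ++ tokenText tok mode)
        · rw [if_pos hlen,
            if_neg (by rw [not_and_or, not_and_or]; exact Or.inr (Or.inl (not_le.mpr hlen)))]
        · rw [if_neg hlen]
          by_cases hpre : (current ++ tokenText tok mode) ∈ lexicon.foldl (fun s w =>
              (List.range (w.toList.length + 1)).foldl (fun s i => PySem.Set.add s (String.ofList (w.toList.take i))) s)
              PySem.Set.empty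
          · rw [if_pos ⟨hm, not_lt.mp hlen, hpre⟩, ih]
          · rw [if_neg (by tauto)]
            apply walkA_dead
            rw [← mem_prefixSet lexicon]
            exact hpre

-- ===== VERDICT (by name: the statement is the Claim_ definition above) =====
theorem wheel_candidate_words_for_mode_spec : Claim_equal_wheel_candidate_words_for_mode := by
  intro lexicon wheel_tokens mode min_len max_len _
  unfold Spec_wheel_candidate_words_for_mode wheel_candidate_words_for_mode wheel_candidate_words_for_mode_alt
  rw [PySem.Set.ofList_eq_foldl]
  exact walkA_eq_fold_wordsB lexicon wheel_tokens mode min_len max_len _ _ _ _
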